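-- pv_equiv track=rewrite | github.com/Ask-coder/algorithm-training | 1.0/hw6/H.py | rbinsearch
-- ===== SOURCE A (Python) =====
-- def rbinsearch(k, items):
--     l = 0
--     r = max(items)
--
--     while l < r:
--         m = (l + r + 1) // 2
--         tmp = 0
--         for item in items:
--             tmp += item // m
--         if tmp >= k:
--            l = m
--         else:
--             r = m - 1
--     return l
-- ===== SOURCE B (Python) =====
-- def rbinsearch(k, items):
--     # Count duplicates once so each feasibility check scans only the
--     # distinct values; binary search expressed as tail recursion.
--     cnt = {}
--     for v in items:
--         cnt[v] = cnt.get(v, 0) + 1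
--     hi = items[0]
--     for v in items:
--         if v > hi:
--             hi = v
--
--     def go(l, r):
--         if l >= r:
--             return l
--         m = (l + r + 1) // 2
--         s = 0
--         for v, c in cnt.items():
--             s += c * (v // m)
--         if s >= k:
--             return go(m, r)
--         return go(l, m - 1)
--
--     return go(0, hi)
-- ===== Notes on version B (the rewrite author's own statement) =====
-- stated objective: alternative
-- what changed: B builds a value->count dictionary once so each feasibility check sums c*(v//m) over distinct values instead of scanning all items, and the binary search is expressed as tail recursion instead of a while loop.
import Mathlib
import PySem

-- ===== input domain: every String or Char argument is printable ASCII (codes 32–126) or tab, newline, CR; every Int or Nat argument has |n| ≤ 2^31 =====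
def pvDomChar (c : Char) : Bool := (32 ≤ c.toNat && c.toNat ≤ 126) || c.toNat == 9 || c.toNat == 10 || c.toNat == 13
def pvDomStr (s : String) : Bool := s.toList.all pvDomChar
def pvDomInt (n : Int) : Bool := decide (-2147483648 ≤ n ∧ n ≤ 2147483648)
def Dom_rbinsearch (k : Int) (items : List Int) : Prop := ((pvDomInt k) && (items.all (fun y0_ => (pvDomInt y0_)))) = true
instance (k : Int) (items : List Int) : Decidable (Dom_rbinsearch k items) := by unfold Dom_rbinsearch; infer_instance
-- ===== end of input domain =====

-- B counts duplicates into a dict once (each feasibility check sums c*(v//m) over distinct values)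
-- and expresses the binary search as tail recursion; return-value equivalence on nonempty lists.


-- midpoint bounds used by both ports' termination proofs
theorem pvMid_bounds (l r : Int) (h : l < r) :
    l < PySem.Int.floordiv (l + r + 1) 2 ∧ PySem.Int.floordiv (l + r + 1) 2 ≤ r := by
  rw [PySem.Int.floordiv_eq_ediv_of_pos (by norm_num)]
  omega

-- ===== PORT A =====
-- the while loop of A: state (l, r)
def pvLoopA (k : Int) (items : List Int) (l r : Int) : Int :=
  if h : l < r then
    let m := PySem.Int.floordiv (l + r + 1) 2
    let tmp := items.foldl (fun tmp item => tmp + PySem.Int.floordiv item m) 0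
    if tmp ≥ k then pvLoopA k items m r else pvLoopA k items l (m - 1)
  else l
termination_by (r - l).toNat
decreasing_by
  · have := pvMid_bounds l r h; omega
  · have := pvMid_bounds l r h; omega

def rbinsearch (k : Int) (items : List Int) : Int :=
  match PySem.List.max? items (fun y => y) with
  | none => 0          -- Python: max([]) raises ValueError; excluded by Pre_
  | some r => pvLoopA k items 0 r

-- ===== PORT B =====
-- the tail recursion go(l, r) of B, over the prebuilt counter
def pvGoB (k : Int) (cnt : PySem.Dict Int Int) (l r : Int) : Int :=
  if h : l ≥ r then l
  else
    let m := PySem.Int.floordiv (l + r + 1) 2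
    let s := cnt.items.foldl (fun s vc => s + vc.2 * PySem.Int.floordiv vc.1 m) 0
    if s ≥ k then pvGoB k cnt m r else pvGoB k cnt l (m - 1)
termination_by (r - l).toNat
decreasing_by
  · have := pvMid_bounds l r (by omega); omega
  · have := pvMid_bounds l r (by omega); omega

def rbinsearch_alt (k : Int) (items : List Int) : Int :=
  let cnt := items.foldl (fun d v => d.insert v (d.getD v 0 + 1)) PySem.Dict.empty
  match items with
  | [] => 0            -- Python: items[0] raises IndexError; excluded by Pre_
  | x :: t =>
    let hi := (x :: t).foldl (fun hi v => if v > hi then v else hi) x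
    pvGoB k cnt 0 hi

-- ===== PRECONDITION & SPEC =====
-- Both A (max([])) and B (items[0]) raise on the empty list; Pre_ excludes exactly it.
def Pre_rbinsearch (k : Int) (items : List Int) : Prop := items ≠ []
instance (k : Int) (items : List Int) : Decidable (Pre_rbinsearch k items) := by unfold Pre_rbinsearch; infer_instance
def pvWitness_rbinsearch : Int × List Int := (3, [5, 2, 7])

def Spec_rbinsearch (k : Int) (items : List Int) (out : Int) : Prop := out = rbinsearch_alt k items
instance (k : Int) (items : List Int) (out : Int) : Decidable (Spec_rbinsearch k items out) := by unfold Spec_rbinsearch; infer_instance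

-- ===== CLAIM (what is proved, stated in full; the proofs are below) =====
def Claim_equal_rbinsearch : Prop := ∀ (k : Int) (items : List Int), Dom_rbinsearch k items → Pre_rbinsearch k items → Spec_rbinsearch k items (rbinsearch k items)

-- ===== LEMMAS AND PROOFS =====

-- B's running-maximum loop computes max(items)
theorem pvHi_eq_max (x : Int) (t : List Int) :
    (x :: t).foldl (fun hi v => if v > hi then v else hi) x = t.foldl max x := by
  have hfun : (fun hi v : Int => if v > hi then v else hi) = max := by
    funext a b; simp only [max_def]; split <;> split <;> omega
  rw [hfun]
  simp [List.foldl_cons]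

-- grouped sum over distinct values equals the plain sum
theorem pvSum_count (xs : List Int) (f : Int → Int) :
    (((PySem.Set.ofList xs : List Int)).map (fun v => (xs.count v : Int) * f v)).sum
      = (xs.map f).sum := by
  have hnd : (PySem.Set.ofList xs : List Int).Nodup := by exact PySem.Set.nodup_ofList _
  have hfin : (PySem.Set.ofList xs : List Int).toFinset = xs.toFinset := by
    ext v; simp [List.mem_toFinset, PySem.Set.mem_ofList]
  rw [← List.sum_toFinset _ hnd, hfin]
  have h2 := Finset.sum_multiset_map_count (xs : Multiset Int) f
  simp only [Multiset.map_coe, Multiset.sum_coe, Multiset.coe_count] at h2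
  rw [h2]
  refine Finset.sum_congr rfl fun v _ => ?_
  rw [nsmul_eq_mul]

-- A's inner scan equals B's scan of the counter's items, for every divisor m
theorem pvInner_eq (items : List Int) (m : Int) :
    items.foldl (fun tmp item => tmp + PySem.Int.floordiv item m) 0
      = (items.foldl (fun d v => d.insert v (d.getD v 0 + 1)) PySem.Dict.empty).items.foldl
          (fun s vc => s + vc.2 * PySem.Int.floordiv vc.1 m) 0 := by
  rw [PySem.Dict.foldl_insert_getD_add_one_eq_counter]
  rw [PySem.List.foldl_add, PySem.List.foldl_add]
  rw [PySem.Dict.items_counter]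
  simp only [List.map_map, zero_add]
  rw [← pvSum_count items (fun v => PySem.Int.floordiv v m)]
  rfl

-- the two searches walk the same bound sequence
theorem pvLoop_eq (k : Int) (items : List Int) (n : Nat) :
    ∀ l r : Int, (r - l).toNat ≤ n →
      pvLoopA k items l r
        = pvGoB k (items.foldl (fun d v => d.insert v (d.getD v 0 + 1)) PySem.Dict.empty) l r := by
  induction n with
  | zero =>
    intro l r hn
    rw [pvLoopA, pvGoB]
    have : ¬ l < r := by omega
    simp [this, le_of_not_gt this]
  | succ n ih =>
    intro l r hn
    rw [pvLoopA, pvGoB]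
    by_cases hlr : l < r
    · have hm := pvMid_bounds l r hlr
      simp only [hlr, dif_pos, not_le.mpr hlr]
      rw [← pvInner_eq items (PySem.Int.floordiv (l + r + 1) 2)]
      split
      · exact ih _ _ (by omega)
      · exact ih _ _ (by omega)
    · simp [hlr, le_of_not_gt hlr]

-- ===== VERDICT (by name: the statement is the Claim_ definition above) =====
theorem rbinsearch_spec : Claim_equal_rbinsearch := by
  intro k items _ hpre
  unfold Spec_rbinsearch
  match items, hpre with
  | x :: t, _ =>
    simp only [rbinsearch, rbinsearch_alt, PySem.List.max?_id_cons, pvHi_eq_max]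
    exact pvLoop_eq k (x :: t) _ 0 (t.foldl max x) le_rfl
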